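-- pv_equiv track=rewrite | github.com/ark2016/VK-Technopark-project-2024 | data_mining/tests/functions/file_941_960.py | create_divisors_dict
-- ===== SOURCE A (Python) =====
-- def create_divisors_dict(lst):
--     if not lst:
--         return None
--     divisors_dict = {}
--     for item in lst:
--         divisors = {i for i in range(1, item + 1) if item % i == 0}
--         divisors_dict[item] = divisors
--     return divisors_dict if divisors_dict else None
-- ===== SOURCE B (Python) =====
-- def create_divisors_dict(lst):
--     if not lst:
--         return None
--     result = {}
--     for item in lst:
--         small, large = [], []
--         i = 1
--         while i * i <= item:
--             if item % i == 0:
--                 small.append(i)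
--                 if i != item // i:
--                     large.append(item // i)
--             i += 1
--         result[item] = set(small + large[::-1])
--     return result
-- ===== Notes on version B (the rewrite author's own statement) =====
-- stated objective: faster
-- what changed: B enumerates divisor pairs (i, item//i) only up to sqrt(item) with a while loop instead of testing every candidate in range(1, item+1).
import Mathlib
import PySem

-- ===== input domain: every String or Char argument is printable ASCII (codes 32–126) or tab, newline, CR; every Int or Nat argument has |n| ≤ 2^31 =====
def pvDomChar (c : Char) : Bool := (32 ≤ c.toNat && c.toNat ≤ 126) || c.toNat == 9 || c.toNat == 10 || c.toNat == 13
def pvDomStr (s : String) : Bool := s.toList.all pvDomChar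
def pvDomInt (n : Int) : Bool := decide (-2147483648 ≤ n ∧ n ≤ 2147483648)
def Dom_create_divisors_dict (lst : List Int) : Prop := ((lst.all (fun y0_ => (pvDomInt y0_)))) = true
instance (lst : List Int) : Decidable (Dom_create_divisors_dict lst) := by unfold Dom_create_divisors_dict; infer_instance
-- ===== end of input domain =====

-- B replaces A's full scan range(1, item+1) by a sqrt-bounded enumeration of divisor pairs (i, item//i): asymptotically faster per item.
-- Both programs return a dict whose values are Python sets; set values are modelled as their distinct-element lists.

-- ===== PORT A =====
def create_divisors_dict (lst : List Int) : Option (List (Int × List Int)) :=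
  if lst = [] then none
  else
    let d := lst.foldl (fun d item =>
      d.insert item (PySem.Set.ofList
        ((PySem.List.pyRange 1 (item + 1) 1).filter (fun i => PySem.Int.mod item i == 0))))
      PySem.Dict.empty
    if d.items = [] then none else some d.items

-- ===== PORT B =====
-- termination helper for the while loop (cited by decreasing_by)
theorem pv_loop_dec (item i : Int) (h : i * i ≤ item) :
    (item + 1 - (i + 1)).toNat < (item + 1 - i).toNat := by
  by_cases hi : i ≤ 0
  · have h0 : (0:Int) ≤ i * i := mul_self_nonneg i
    omega
  · have hi1 : (1:Int) ≤ i := by omega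
    have : i * 1 ≤ i * i := by
      apply mul_le_mul_of_nonneg_left hi1
      omega
    simp at this
    omega

def pvDivLoop (item i : Int) (small large : List Int) : List Int × List Int :=
  if h : i * i ≤ item then
    if PySem.Int.mod item i == 0 then
      pvDivLoop item (i + 1) (small ++ [i])
        (if i != PySem.Int.floordiv item i then large ++ [PySem.Int.floordiv item i] else large)
    else pvDivLoop item (i + 1) small large
  else (small, large)
termination_by (item + 1 - i).toNat
decreasing_by all_goals exact pv_loop_dec item i h

def create_divisors_dict_alt (lst : List Int) : Option (List (Int × List Int)) :=
  if lst = [] then none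
  else
    some ((lst.foldl (fun d item =>
      let p := pvDivLoop item 1 [] []
      d.insert item (PySem.Set.ofList (p.1 ++ p.2.reverse))) PySem.Dict.empty).items)

-- ===== PRECONDITION & SPEC =====
def Spec_create_divisors_dict (lst : List Int) (out : Option (List (Int × List Int))) : Prop := out = create_divisors_dict_alt lst
instance (lst : List Int) (out : Option (List (Int × List Int))) : Decidable (Spec_create_divisors_dict lst out) := by unfold Spec_create_divisors_dict; infer_instance

-- ===== CLAIM (what is proved, stated in full; the proofs are below) =====
def Claim_equal_create_divisors_dict : Prop := ∀ (lst : List Int), Dom_create_divisors_dict lst → Spec_create_divisors_dict lst (create_divisors_dict lst)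

-- ===== LEMMAS AND PROOFS =====

-- pure (accumulator-free) forms of B's while loop, in ediv/emod arithmetic
def pvS (n i : Int) : List Int :=
  if i * i ≤ n then (if n % i = 0 then [i] else []) ++ pvS n (i + 1) else []
termination_by (n + 1 - i).toNat
decreasing_by exact pv_loop_dec n i (by assumption)

def pvL (n i : Int) : List Int :=
  if i * i ≤ n then (if n % i = 0 ∧ i ≠ n / i then [n / i] else []) ++ pvL n (i + 1) else []
termination_by (n + 1 - i).toNat
decreasing_by exact pv_loop_dec n i (by assumption)

theorem pvDivLoop_eq (n i : Int) (hi : 1 ≤ i) (small large : List Int) :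
    pvDivLoop n i small large = (small ++ pvS n i, large ++ pvL n i) := by
  rw [pvDivLoop, pvS, pvL]
  by_cases h : i * i ≤ n
  · have hmod : PySem.Int.mod n i = n % i := PySem.Int.mod_eq_emod_of_pos (by omega : (0:Int) < i)
    have hdiv : PySem.Int.floordiv n i = n / i := PySem.Int.floordiv_eq_ediv_of_pos (by omega : (0:Int) < i)
    have ih := pvDivLoop_eq n (i + 1) (by omega)
    rw [dif_pos h, if_pos h, if_pos h, hmod, hdiv]
    by_cases hm : n % i = 0
    · rw [if_pos (beq_iff_eq.mpr hm), if_pos hm]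
      by_cases hne : i = n / i
      · rw [if_neg (show ¬((i != n / i) = true) from fun hc => bne_iff_ne.mp hc hne),
            if_neg (show ¬(n % i = 0 ∧ i ≠ n / i) from fun hc => hc.2 hne), ih]
        simp
      · rw [if_pos (bne_iff_ne.mpr hne), if_pos ⟨hm, hne⟩, ih]
        simp
    · rw [if_neg (show ¬((n % i == 0) = true) from fun hc => hm (beq_iff_eq.mp hc)),
          if_neg hm, if_neg (show ¬(n % i = 0 ∧ i ≠ n / i) from fun hc => hm hc.1), ih]
      simp
  · simp [h]
termination_by (n + 1 - i).toNat
decreasing_by exact pv_loop_dec n i h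

theorem pv_sq_le (a b : Int) (h1 : 1 ≤ a) (h2 : a ≤ b) : a * a ≤ b * b :=
  mul_le_mul h2 h2 (by omega) (by omega)

theorem pvS_char (n : Int) : ∀ i, 1 ≤ i →
    pvS n i = (PySem.List.pyRange i (n + 1) 1).filter
      (fun d => decide (n % d = 0) && decide (d * d ≤ n)) := by
  intro i hi
  rw [pvS]
  by_cases h : i * i ≤ n
  · have hin : i ≤ n := le_trans (by nlinarith) h
    have ih := pvS_char n (i + 1) (by omega)
    rw [if_pos h, ih, PySem.List.pyRange_one_cons (show i < n + 1 by omega), List.filter_cons]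
    by_cases hm : n % i = 0
    · rw [if_pos hm,
          if_pos (show (decide (n % i = 0) && decide (i * i ≤ n)) = true by simp [hm, h])]
      rfl
    · rw [if_neg hm,
          if_neg (show ¬((decide (n % i = 0) && decide (i * i ≤ n)) = true) by simp [hm])]
      rfl
  · rw [if_neg h, List.filter_eq_nil_iff.mpr]
    intro d hd
    rw [PySem.List.mem_pyRange_one] at hd
    have : ¬ d * d ≤ n := fun hdd => h (le_trans (pv_sq_le i d hi hd.1) hdd)
    simp [this]
termination_by i => (n + 1 - i).toNat
decreasing_by exact pv_loop_dec n i h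

theorem pvL_mem (n x : Int) : ∀ i, 1 ≤ i →
    (x ∈ pvL n i ↔ ∃ j, i ≤ j ∧ j * j ≤ n ∧ n % j = 0 ∧ j ≠ n / j ∧ x = n / j) := by
  intro i hi
  rw [pvL]
  by_cases h : i * i ≤ n
  · have ih := pvL_mem n x (i + 1) (by omega)
    rw [if_pos h]
    constructor
    · intro hx
      rcases List.mem_append.mp hx with hx | hx
      · by_cases hc : n % i = 0 ∧ i ≠ n / i
        · rw [if_pos hc] at hx
          simp at hx
          exact ⟨i, le_refl i, h, hc.1, hc.2, hx⟩
        · rw [if_neg hc] at hx; simp at hx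
      · rcases ih.mp hx with ⟨j, hj1, hj2, hj3, hj4, hj5⟩
        exact ⟨j, by omega, hj2, hj3, hj4, hj5⟩
    · rintro ⟨j, hj1, hj2, hj3, hj4, hj5⟩
      rcases eq_or_lt_of_le hj1 with rfl | hij
      · apply List.mem_append.mpr (Or.inl _)
        simp [hj3, hj4, hj5]
      · exact List.mem_append.mpr (Or.inr (ih.mpr ⟨j, by omega, hj2, hj3, hj4, hj5⟩))
  · rw [if_neg h]
    simp only [List.not_mem_nil, false_iff]
    rintro ⟨j, hj1, hj2, _, _, _⟩
    exact h (le_trans (pv_sq_le i j hi (by omega)) hj2)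
termination_by i => (n + 1 - i).toNat
decreasing_by exact pv_loop_dec n i h

-- cofactor arithmetic
theorem pv_cof_pos (n x : Int) (hn : 1 ≤ n) (hx : 1 ≤ x) (hd : x ∣ n) : 1 ≤ n / x := by
  rcases hd with ⟨c, rfl⟩
  rw [Int.mul_ediv_cancel_left _ (by omega)]
  nlinarith

theorem pv_div_strict (n i j : Int) (hi : 1 ≤ i) (hij : i < j) (hjn : j * j ≤ n)
    (hdi : i ∣ n) (hdj : j ∣ n) : n / j < n / i := by
  have hn : 1 ≤ n := le_trans (by nlinarith) hjn
  have ha : n / i * i = n := Int.ediv_mul_cancel hdi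
  have hb : n / j * j = n := Int.ediv_mul_cancel hdj
  have hbp : 1 ≤ n / j := pv_cof_pos n j hn (by omega) hdj
  nlinarith

theorem pvL_pairwise (n : Int) : ∀ i, 1 ≤ i → (pvL n i).Pairwise (· > ·) := by
  intro i hi
  rw [pvL]
  by_cases h : i * i ≤ n
  · have ih := pvL_pairwise n (i + 1) (by omega)
    rw [if_pos h]
    by_cases hc : n % i = 0 ∧ i ≠ n / i
    · rw [if_pos hc]
      refine List.pairwise_cons.mpr ⟨?_, ih⟩
      intro x hx
      rcases (pvL_mem n x (i + 1) (by omega)).mp hx with ⟨j, hj1, hj2, hj3, _, rfl⟩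
      exact pv_div_strict n i j hi (by omega) hj2
        (Int.dvd_of_emod_eq_zero hc.1) (Int.dvd_of_emod_eq_zero hj3)
    · rw [if_neg hc]; simpa using ih
  · simp [h]
termination_by i => (n + 1 - i).toNat
decreasing_by exact pv_loop_dec n i h

-- membership characterisation of the large-divisor list, n ≥ 1
theorem pvL_mem_one (n x : Int) (hn : 1 ≤ n) :
    x ∈ pvL n 1 ↔ 1 ≤ x ∧ x ≤ n ∧ n % x = 0 ∧ n < x * x := by
  rw [pvL_mem n x 1 (by omega)]
  constructor
  · rintro ⟨j, hj1, hj2, hj3, hj4, rfl⟩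
    have hdj : j ∣ n := Int.dvd_of_emod_eq_zero hj3
    have hb : n / j * j = n := Int.ediv_mul_cancel hdj
    have hbp : 1 ≤ n / j := pv_cof_pos n j hn (by omega) hdj
    have hjx : j < n / j := by
      by_cases hlt : j < n / j
      · exact hlt
      · exfalso
        have hle : n ≤ j * j := by nlinarith
        have heq : n = j * j := le_antisymm hle hj2
        exact hj4 (by rw [heq, Int.mul_ediv_cancel _ (show j ≠ 0 by omega)])
    refine ⟨by omega, by nlinarith, ?_, by nlinarith⟩
    exact Int.emod_eq_zero_of_dvd ⟨j, hb.symm⟩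
  · rintro ⟨hx1, hx2, hx3, hx4⟩
    have hdx : x ∣ n := Int.dvd_of_emod_eq_zero hx3
    have hb : n / x * x = n := Int.ediv_mul_cancel hdx
    have hbp : 1 ≤ n / x := pv_cof_pos n x hn (by omega) hdx
    have hjx : n / x < x := by
      apply lt_of_mul_lt_mul_right _ (show (0:Int) ≤ x by omega)
      rw [hb]; exact hx4
    have hnn : n / (n / x) = x := by
      calc n / (n / x) = n / x * x / (n / x) := by rw [hb]
        _ = x := Int.mul_ediv_cancel_left _ (show n / x ≠ 0 by omega)
    refine ⟨n / x, by omega, by nlinarith, ?_, ?_, hnn.symm⟩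
    · exact Int.emod_eq_zero_of_dvd ⟨x, hb.symm⟩
    · rw [hnn]; omega

-- generic split of a filter along a downward-closed test
theorem pv_filter_split (p q : Int → Bool) :
    ∀ l : List Int, l.Pairwise (fun a b => q b = true → q a = true) →
      l.filter p = l.filter (fun x => p x && q x) ++ l.filter (fun x => p x && !q x) := by
  intro l hl
  induction l with
  | nil => simp
  | cons a l ih =>
    rcases List.pairwise_cons.mp hl with ⟨ha, hl'⟩
    by_cases hq : q a = true
    · by_cases hp : p a = true <;> simp [hp, hq, ih hl']
    · have hall : ∀ b ∈ l, q b = false := by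
        intro b hb
        rcases Bool.eq_false_or_eq_true (q b) with h | h
        · exact absurd (ha b hb h) hq
        · exact h
      have h1 : List.filter (fun x => p x && q x) (a :: l) = [] := by
        rw [List.filter_eq_nil_iff]
        intro b hb
        rcases List.mem_cons.mp hb with rfl | hb
        · simp [hq]
        · simp [hall b hb]
      have h2 : List.filter (fun x => p x && !q x) (a :: l) = List.filter p (a :: l) := by
        apply List.filter_congr
        intro b hb
        rcases List.mem_cons.mp hb with rfl | hb
        · simp [hq]
        · simp [hall b hb]
      rw [h1, h2, List.nil_append]

-- the per-item list identity: A's increasing divisor list = small part ++ reversed large part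
theorem pv_item_eq (n : Int) :
    (PySem.List.pyRange 1 (n + 1) 1).filter (fun i => PySem.Int.mod n i == 0)
      = pvS n 1 ++ (pvL n 1).reverse := by
  by_cases hn : 1 ≤ n
  · have hconv : (PySem.List.pyRange 1 (n + 1) 1).filter (fun i => PySem.Int.mod n i == 0)
        = (PySem.List.pyRange 1 (n + 1) 1).filter (fun d => decide (n % d = 0)) := by
      apply List.filter_congr
      intro d hd
      rw [PySem.List.mem_pyRange_one] at hd
      rw [PySem.Int.mod_eq_emod_of_pos (by omega : (0:Int) < d), Bool.eq_iff_iff]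
      simp only [beq_iff_eq, decide_eq_true_eq]
    have hpw : (PySem.List.pyRange 1 (n + 1) 1).Pairwise
        (fun a b => decide (b * b ≤ n) = true → decide (a * a ≤ n) = true) := by
      apply List.Pairwise.imp_of_mem _ (PySem.List.pairwise_lt_pyRange_one 1 (n + 1))
      intro a b hma hmb hab hb
      rw [PySem.List.mem_pyRange_one] at hma hmb
      simp only [decide_eq_true_eq] at *
      exact le_trans (pv_sq_le a b (by omega) (by omega)) hb
    rw [hconv, pv_filter_split (fun d => decide (n % d = 0)) (fun d => decide (d * d ≤ n)) _ hpw]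
    congr 1
    · rw [pvS_char n 1 (by omega)]
    · -- reversed large list = the divisors above the square root, by perm + sortedness
      have hmemL : ∀ x, x ∈ (pvL n 1).reverse ↔
          x ∈ (PySem.List.pyRange 1 (n + 1) 1).filter
            (fun x => decide (n % x = 0) && !decide (x * x ≤ n)) := by
        intro x
        rw [List.mem_reverse, pvL_mem_one n x hn, List.mem_filter, PySem.List.mem_pyRange_one]
        constructor
        · rintro ⟨h1, h2, h3, h4⟩
          refine ⟨⟨h1, by omega⟩, ?_⟩
          simp [h3, not_le.mpr h4]
        · rintro ⟨⟨h1, h2⟩, h3⟩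
          simp only [Bool.and_eq_true, Bool.not_eq_true', decide_eq_true_eq,
            decide_eq_false_iff_not, not_le] at h3
          exact ⟨h1, by omega, h3.1, h3.2⟩
      have hnd1 : (pvL n 1).reverse.Nodup := by
        rw [List.nodup_reverse]
        exact (pvL_pairwise n 1 (by omega)).imp (fun h => ne_of_gt h)
      have hnd2 : ((PySem.List.pyRange 1 (n + 1) 1).filter
          (fun x => decide (n % x = 0) && !decide (x * x ≤ n))).Nodup :=
        (PySem.List.nodup_pyRange_one 1 (n + 1)).filter _
      have hperm := (List.perm_ext_iff_of_nodup hnd1 hnd2).mpr hmemL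
      have hp1 : ((pvL n 1).reverse).Pairwise (· < ·) := by
        rw [List.pairwise_reverse]
        exact pvL_pairwise n 1 (by omega)
      have hp2 : ((PySem.List.pyRange 1 (n + 1) 1).filter
          (fun x => decide (n % x = 0) && !decide (x * x ≤ n))).Pairwise (· < ·) :=
        List.Pairwise.sublist List.filter_sublist
          (PySem.List.pairwise_lt_pyRange_one 1 (n + 1))
      exact (List.Perm.eq_of_pairwise
        (fun a b _ _ h h' => absurd h' (not_lt.mpr (le_of_lt h))) hp1 hp2 hperm).symm
  · have hr : PySem.List.pyRange 1 (n + 1) 1 = [] := PySem.List.pyRange_one_eq_nil (by omega)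
    have hs : pvS n 1 = [] := by rw [pvS, if_neg (by nlinarith)]
    have hl : pvL n 1 = [] := by rw [pvL, if_neg (by nlinarith)]
    simp [hr, hs, hl]

theorem pv_keys_eq (d : PySem.Dict Int (List Int)) : d.keys = d.items.map (·.1) := rfl

theorem pv_insert_items_ne (d : PySem.Dict Int (List Int)) (k : Int) (v : List Int) :
    (d.insert k v).items ≠ [] := by
  rw [PySem.Dict.items_insert]
  by_cases hc : d.contains k = true
  · rw [if_pos hc]
    intro h
    rw [List.map_eq_nil_iff] at h
    have hk : k ∈ d.keys := (PySem.Dict.contains_iff_mem_keys d k).mp hc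
    rw [pv_keys_eq, h] at hk
    simp at hk
  · simp [hc]

theorem pv_items_ne (g : Int → List Int) :
    ∀ (l : List Int) (d : PySem.Dict Int (List Int)), d.items ≠ [] →
      (l.foldl (fun d item => d.insert item (g item)) d).items ≠ [] := by
  intro l
  induction l with
  | nil => intro d hd; exact hd
  | cons x l ih =>
    intro d _
    rw [List.foldl_cons]
    exact ih _ (pv_insert_items_ne d x (g x))

theorem create_divisors_dict_main (lst : List Int) :
    create_divisors_dict lst = create_divisors_dict_alt lst := by
  unfold create_divisors_dict create_divisors_dict_alt
  by_cases hl : lst = []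
  · simp [hl]
  · rw [if_neg hl, if_neg hl]
    have hfun : (fun (d : PySem.Dict Int (List Int)) (item : Int) =>
        d.insert item (PySem.Set.ofList
          ((PySem.List.pyRange 1 (item + 1) 1).filter (fun i => PySem.Int.mod item i == 0))))
      = (fun (d : PySem.Dict Int (List Int)) (item : Int) =>
        let p := pvDivLoop item 1 [] []
        d.insert item (PySem.Set.ofList (p.1 ++ p.2.reverse))) := by
      funext d item
      rw [pvDivLoop_eq item 1 (by omega) [] []]
      simp only [List.nil_append]
      rw [pv_item_eq item]
    rw [hfun]
    rcases lst with _ | ⟨x, rest⟩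
    · exact absurd rfl hl
    have hne : ((List.foldl (fun (d : PySem.Dict Int (List Int)) (item : Int) =>
        let p := pvDivLoop item 1 [] []
        d.insert item (PySem.Set.ofList (p.1 ++ p.2.reverse))) PySem.Dict.empty
        (x :: rest)).items) ≠ [] := by
      rw [List.foldl_cons]
      exact pv_items_ne
        (fun item => PySem.Set.ofList
          ((pvDivLoop item 1 [] []).1 ++ (pvDivLoop item 1 [] []).2.reverse))
        rest _ (pv_insert_items_ne _ _ _)
    rw [if_neg hne]

-- ===== VERDICT (by name: the statement is the Claim_ definition above) =====
theorem create_divisors_dict_spec : Claim_equal_create_divisors_dict := by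
  intro lst _
  unfold Spec_create_divisors_dict
  exact create_divisors_dict_main lst
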